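-- pv_equiv track=rewrite | github.com/papermerge/papermerge-cli | papermerge_cli/utils.py | sanitize_host
-- ===== SOURCE A (Python) =====
-- def sanitize_host(host: str) -> str|None:
--     """Remove unnecessary characters from host name
--
--     Unnecessary characters may be one or multiple whitespaces,
--     or one/multiple slashes at the end of the host name.
--     """
--     if host is None:
--         return host
--
--     host = host.strip()
--     if host[-1] == '/':
--         clean_host = host[0:-1]
--         # just in case there are more trailing slash characters...
--         return sanitize_host(clean_host)
--
--     return host
-- ===== SOURCE B (Python) =====
-- def sanitize_host(host):
--     """Remove surrounding whitespace and trailing slashes from the host name."""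
--     if host is None:
--         return host
--     s = host.lstrip()
--     i = len(s)
--     while i > 0 and (s[i-1].isspace() or s[i-1] == '/'):
--         i -= 1
--     return s[:i]
-- ===== Notes on version B (the rewrite author's own statement) =====
-- stated objective: alternative
-- what changed: Replaced A's strip-and-recurse (which re-slices and re-strips the string for every trailing slash) with one lstrip plus a single backward index scan over trailing whitespace/slash characters and one final slice.
-- outside the precondition, e.g. on sanitize_host('/'): A raises IndexError, B returns ''; on sanitize_host('  '): A raises IndexError, B returns ''
import Mathlib
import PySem

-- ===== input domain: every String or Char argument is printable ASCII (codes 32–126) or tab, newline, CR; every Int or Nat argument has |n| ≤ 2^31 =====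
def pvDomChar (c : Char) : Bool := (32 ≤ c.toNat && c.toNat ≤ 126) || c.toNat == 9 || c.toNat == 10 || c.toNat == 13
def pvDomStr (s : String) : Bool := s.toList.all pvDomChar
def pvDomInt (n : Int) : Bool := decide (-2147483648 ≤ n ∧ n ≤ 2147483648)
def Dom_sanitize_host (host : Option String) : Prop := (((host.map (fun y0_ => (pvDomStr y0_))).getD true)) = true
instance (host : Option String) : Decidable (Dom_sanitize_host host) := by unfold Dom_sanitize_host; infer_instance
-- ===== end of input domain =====

-- B replaces A's strip-and-recurse (which re-slices and re-strips the string on every trailing slash)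
-- with one lstrip and a single backward index scan past trailing whitespace/slashes, then one slice.

-- cited by port A's decreasing_by: stripping never lengthens a string
theorem strip_length_le (cs : List Char) : (PySem.Chars.strip cs).length ≤ cs.length := by
  simp only [PySem.Chars.strip, PySem.Chars.rstrip, PySem.Chars.lstrip]
  calc ((((cs.dropWhile PySem.Chars.isspace).reverse).dropWhile PySem.Chars.isspace).reverse).length
      = (((cs.dropWhile PySem.Chars.isspace).reverse).dropWhile PySem.Chars.isspace).length := by
        rw [List.length_reverse]
    _ ≤ ((cs.dropWhile PySem.Chars.isspace).reverse).length := (List.dropWhile_sublist _).length_le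
    _ = (cs.dropWhile PySem.Chars.isspace).length := by rw [List.length_reverse]
    _ ≤ cs.length := (List.dropWhile_sublist _).length_le

-- ===== PORT A =====
-- host = host.strip(); if host[-1] == '/': return sanitize_host(host[0:-1]); return host
-- (where Python A raises IndexError — stripped string empty — pyGet? is none, the '/' test is false and the
--  port returns the stripped (empty) string; those inputs are excluded by Pre_sanitize_host)
def sanAux (cs : List Char) : List Char :=
  if h : PySem.List.pyGet? (PySem.Chars.strip cs) (-1) = some '/' then
    sanAux (PySem.List.slice (PySem.Chars.strip cs) (some 0) (some (-1)))
  else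
    PySem.Chars.strip cs
termination_by cs.length
decreasing_by
  have ht : PySem.Chars.strip cs ≠ [] := by
    intro hnil; rw [hnil] at h; exact absurd h (by decide)
  have hle := strip_length_le cs
  have hpos : 0 < (PySem.Chars.strip cs).length := List.length_pos_of_ne_nil ht
  have hdl : ((PySem.Chars.strip cs).dropLast).length = (PySem.Chars.strip cs).length - 1 := by simp
  simp only [PySem.List.slice_zero_start, PySem.List.slice_to_neg_one]
  omega

def sanitize_host (host : Option String) : Option String :=
  match host with
  | none => none
  | some s => some (String.ofList (sanAux s.toList))

-- ===== PORT B =====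
-- s = host.lstrip(); i = len(s); while i > 0 and (s[i-1].isspace() or s[i-1] == '/'): i -= 1; return s[:i]
def badChar (c : Char) : Bool := PySem.Chars.isspace c || c == '/'

-- the while loop on the index i; s[i-1] is always in range (0 < i ≤ len s), so getD is exact here
def sanBIdx (cs : List Char) : Nat → Nat
  | 0 => 0
  | n + 1 => if badChar (cs.getD n ' ') then sanBIdx cs n else n + 1

def sanitize_host_alt (host : Option String) : Option String :=
  match host with
  | none => none
  | some s =>
    let cs := PySem.Chars.lstrip s.toList
    some (String.ofList (cs.take (sanBIdx cs cs.length)))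

-- ===== PRECONDITION & SPEC =====
-- Pre_ excludes exactly the inputs on which Python A raises IndexError: strings whose every
-- character is whitespace or '/' (the stripped string eventually becomes empty and host[-1] raises).
def Pre_sanitize_host (host : Option String) : Prop :=
  (host.map (fun s => s.toList.any (fun c => !(PySem.Chars.isspace c) && c != '/'))).getD true = true

instance (host : Option String) : Decidable (Pre_sanitize_host host) := by
  unfold Pre_sanitize_host; infer_instance

def pvWitness_sanitize_host : Option String := some "  example.com// "

def Spec_sanitize_host (host : Option String) (out : Option String) : Prop := out = sanitize_host_alt host
instance (host : Option String) (out : Option String) : Decidable (Spec_sanitize_host host out) := by unfold Spec_sanitize_host; infer_instance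

-- ===== CLAIM (what is proved, stated in full; the proofs are below) =====
def Claim_equal_sanitize_host : Prop := ∀ (host : Option String), Dom_sanitize_host host → Pre_sanitize_host host → Spec_sanitize_host host (sanitize_host host)

-- ===== LEMMAS AND PROOFS =====

-- drop the trailing run of bad (whitespace-or-slash) characters
def rstripBad (l : List Char) : List Char := (l.reverse.dropWhile badChar).reverse

theorem dropWhile_imp {p q : Char → Bool} (h : ∀ c, p c = true → q c = true)
    (l : List Char) : (l.dropWhile p).dropWhile q = l.dropWhile q := by
  induction l with
  | nil => rfl
  | cons a l ih =>
    by_cases hpa : p a = true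
    · rw [List.dropWhile_cons_of_pos hpa, List.dropWhile_cons_of_pos (h a hpa), ih]
    · rw [List.dropWhile_cons_of_neg hpa]

theorem rstripBad_rstrip (l : List Char) :
    rstripBad (PySem.Chars.rstrip l) = rstripBad l := by
  simp only [rstripBad, PySem.Chars.rstrip, List.reverse_reverse]
  rw [dropWhile_imp (fun c hc => by simp [badChar, hc]) l.reverse]

theorem head_dropWhile_false {p : Char → Bool} {l : List Char} {a : Char} {r : List Char}
    (h : l.dropWhile p = a :: r) : p a = false := by
  induction l with
  | nil => cases h
  | cons b l ih =>
    by_cases hpb : p b = true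
    · rw [List.dropWhile_cons_of_pos hpb] at h; exact ih h
    · rw [List.dropWhile_cons_of_neg hpb] at h
      cases h; simpa using hpb

theorem rstripBad_append_bad {l : List Char} {c : Char} (hc : badChar c = true) :
    rstripBad (l ++ [c]) = rstripBad l := by
  simp only [rstripBad, List.reverse_append, List.reverse_singleton, List.singleton_append,
    List.dropWhile_cons_of_pos hc]

theorem rstripBad_of_last_not_bad {l : List Char} {c : Char} {m : List Char}
    (hl : l.reverse = c :: m) (hc : badChar c = false) : rstripBad l = l := by
  have hneg : ¬ badChar c = true := by simp [hc]
  simp only [rstripBad, hl, List.dropWhile_cons_of_neg hneg]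
  rw [← hl, List.reverse_reverse]

theorem mem_dropWhile_of_not {p : Char → Bool} {c : Char} {l : List Char}
    (hc : p c = false) (h : c ∈ l) : c ∈ l.dropWhile p := by
  induction l with
  | nil => cases h
  | cons a l ih =>
    by_cases hpa : p a = true
    · rw [List.dropWhile_cons_of_pos hpa]
      rcases List.mem_cons.mp h with rfl | h'
      · rw [hpa] at hc; cases hc
      · exact ih h'
    · rw [List.dropWhile_cons_of_neg hpa]
      exact h

theorem mem_strip_of_good {c : Char} {l : List Char}
    (hc : badChar c = false) (h : c ∈ l) : c ∈ PySem.Chars.strip l := by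
  have hsp : PySem.Chars.isspace c = false := by
    simp only [badChar, Bool.or_eq_false_iff] at hc
    exact hc.1
  simp only [PySem.Chars.strip, PySem.Chars.lstrip, PySem.Chars.rstrip, List.mem_reverse]
  exact mem_dropWhile_of_not hsp (by
    rw [List.mem_reverse]
    exact mem_dropWhile_of_not hsp h)

-- a prefix of an lstrip-fixed list is lstrip-fixed
theorem lstrip_fix_of_prefix {l m : List Char}
    (h : PySem.Chars.lstrip l = l) (hp : m <+: l) : PySem.Chars.lstrip m = m := by
  cases m with
  | nil => rfl
  | cons a r =>
    obtain ⟨t, ht⟩ := hp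
    cases ha : PySem.Chars.isspace a with
    | false =>
      simp only [PySem.Chars.lstrip]
      rw [List.dropWhile_cons_of_neg (show ¬PySem.Chars.isspace a = true by simp [ha])]
    | true =>
      exfalso
      rw [← ht] at h
      simp only [PySem.Chars.lstrip, List.cons_append,
        List.dropWhile_cons_of_pos (show PySem.Chars.isspace a = true from ha)] at h
      have hle := (List.dropWhile_sublist (l := r ++ t) (p := PySem.Chars.isspace)).length_le
      have hlen : (List.dropWhile PySem.Chars.isspace (r ++ t)).length = (r ++ t).length + 1 := by
        rw [h]; simp
      omega

theorem lstrip_strip (l : List Char) :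
    PySem.Chars.lstrip (PySem.Chars.strip l) = PySem.Chars.strip l := by
  have hfix : PySem.Chars.lstrip (PySem.Chars.lstrip l) = PySem.Chars.lstrip l :=
    List.dropWhile_idempotent _ _
  have hp : PySem.Chars.strip l <+: PySem.Chars.lstrip l := by
    simp only [PySem.Chars.strip, PySem.Chars.rstrip]
    obtain ⟨pre, hpre⟩ :=
      List.dropWhile_suffix (l := (PySem.Chars.lstrip l).reverse) (p := PySem.Chars.isspace)
    exact ⟨pre.reverse, by rw [← List.reverse_append, hpre, List.reverse_reverse]⟩
  exact lstrip_fix_of_prefix hfix hp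

theorem rstripBad_lstrip_eq_rstripBad_strip (l : List Char) :
    rstripBad (PySem.Chars.lstrip l) = rstripBad (PySem.Chars.strip l) := by
  have : PySem.Chars.strip l = PySem.Chars.rstrip (PySem.Chars.lstrip l) := rfl
  rw [this, rstripBad_rstrip]

-- A's recursion computes exactly rstripBad of the lstripped input (given a good character)
theorem sanAux_eq_rstripBad (cs : List Char)
    (hg : ∃ c ∈ cs, badChar c = false) : sanAux cs = rstripBad (PySem.Chars.lstrip cs) := by
  obtain ⟨c, hmem, hgood⟩ := hg
  have hct : c ∈ PySem.Chars.strip cs := mem_strip_of_good hgood hmem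
  rw [rstripBad_lstrip_eq_rstripBad_strip, sanAux]
  by_cases hlast : PySem.List.pyGet? (PySem.Chars.strip cs) (-1) = some '/'
  · rw [dif_pos hlast]
    have hlast' : (PySem.Chars.strip cs).getLast? = some '/' := by
      rw [← PySem.List.pyGet?_neg_one]; exact hlast
    obtain ⟨p, hp⟩ : ∃ p, PySem.Chars.strip cs = p ++ ['/'] := by
      rcases List.getLast?_eq_some_iff.mp hlast' with ⟨q, hq⟩; exact ⟨q, hq⟩
    have hdl : (PySem.Chars.strip cs).dropLast = p := by rw [hp]; simp
    have hmemp : c ∈ p := by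
      rw [hp] at hct
      rcases List.mem_append.mp hct with h' | h'
      · exact h'
      · exfalso
        simp only [List.mem_singleton] at h'
        subst h'
        simp [badChar] at hgood
    have hlen : p.length < cs.length := by
      have h1 := strip_length_le cs
      have h2 : (PySem.Chars.strip cs).length = p.length + 1 := by rw [hp]; simp
      omega
    have hslice : PySem.List.slice (PySem.Chars.strip cs) (some 0) (some (-1)) = p := by
      rw [PySem.List.slice_zero_start, PySem.List.slice_to_neg_one, hdl]
    have hlp : PySem.Chars.lstrip p = p :=
      lstrip_fix_of_prefix (lstrip_strip cs) (by rw [← hdl]; exact List.dropLast_prefix _)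
    rw [hslice, sanAux_eq_rstripBad p ⟨c, hmemp, hgood⟩, hlp, hp,
      rstripBad_append_bad (by simp [badChar])]
  · rw [dif_neg hlast]
    have hne : PySem.Chars.strip cs ≠ [] := List.ne_nil_of_mem hct
    obtain ⟨a, m, hrev⟩ : ∃ a m, (PySem.Chars.strip cs).reverse = a :: m := by
      cases hr : (PySem.Chars.strip cs).reverse with
      | nil => exact absurd (by simpa using congrArg List.reverse hr) hne
      | cons a m => exact ⟨a, m, rfl⟩
    have hasp : PySem.Chars.isspace a = false := by
      have : (PySem.Chars.strip cs).reverse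
          = (PySem.Chars.lstrip cs).reverse.dropWhile PySem.Chars.isspace := by
        simp [PySem.Chars.strip, PySem.Chars.rstrip]
      exact head_dropWhile_false (by rw [← this, hrev])
    have haslash : a ≠ '/' := by
      intro heq
      apply hlast
      rw [PySem.List.pyGet?_neg_one]
      have : (PySem.Chars.strip cs).getLast? = some a := by
        rw [← List.head?_reverse, hrev]; rfl
      rw [this, heq]
    exact (rstripBad_of_last_not_bad hrev (by simp [badChar, hasp, haslash])).symm
termination_by cs.length
decreasing_by exact hlen

-- B's index loop computes exactly rstripBad of its input
theorem take_sanBIdx (cs : List Char) :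
    ∀ i : Nat, i ≤ cs.length → cs.take (sanBIdx cs i) = rstripBad (cs.take i) := by
  intro i
  induction i with
  | zero => intro _; simp [sanBIdx, rstripBad]
  | succ n ih =>
    intro hle
    have hn : n < cs.length := by omega
    obtain ⟨c, hc⟩ : ∃ c, cs[n]? = some c := ⟨cs[n], by simp [hn]⟩
    have hgetD : cs.getD n ' ' = c := by simp [List.getD, hc]
    have htake : cs.take (n + 1) = cs.take n ++ [c] := by
      rw [List.take_succ, hc]; rfl
    rw [sanBIdx]
    by_cases hb : badChar (cs.getD n ' ') = true
    · rw [if_pos hb, ih (by omega), htake, rstripBad_append_bad (by rwa [hgetD] at hb)]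
    · rw [if_neg hb, htake]
      exact (rstripBad_of_last_not_bad (l := cs.take n ++ [c]) (c := c) (m := (cs.take n).reverse)
        (by simp) (by rw [hgetD] at hb; simpa using hb)).symm

-- ===== VERDICT (by name: the statement is the Claim_ definition above) =====
theorem sanitize_host_spec : Claim_equal_sanitize_host := by
  intro host _hdom hpre
  unfold Spec_sanitize_host
  cases host with
  | none => rfl
  | some s =>
    simp only [sanitize_host, sanitize_host_alt, Option.some_inj]
    unfold Pre_sanitize_host at hpre
    simp only [Option.map_some, Option.getD_some, List.any_eq_true] at hpre
    obtain ⟨c, hmem, hc⟩ := hpre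
    have hgood : badChar c = false := by
      simp only [Bool.and_eq_true, Bool.not_eq_eq_eq_not, Bool.not_true] at hc
      simp [badChar, hc.1, bne_iff_ne.mp hc.2]
    rw [sanAux_eq_rstripBad s.toList ⟨c, hmem, hgood⟩,
      take_sanBIdx (PySem.Chars.lstrip s.toList) _ (le_refl _), List.take_length]
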